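-- pv_equiv track=rewrite | github.com/sgttomas/chirality-piping | tools/publication/extract_concordance_evidence.py | section_map_index
-- ===== SOURCE A (Python) =====
-- from typing import Dict, Iterable, List, Sequence, Tuple
--
-- def section_map_index(rows: List[Dict[str, str]]) -> Dict[str, Dict[str, object]]:
--     index: Dict[str, Dict[str, object]] = {}
--     for row in rows:
--         artifact = row.get("ArtifactPath", "")
--         if not artifact:
--             continue
--         entry = index.setdefault(
--             artifact,
--             {
--                 "sections": set(),
--                 "ktys": set(),
--                 "mapping_roles": set(),
--                 "contribution_scopes": set(),
--                 "lifecycle_states": set(),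
--                 "current_state_basis": set(),
--             },
--         )
--         entry["sections"].add(row.get("SectionID", ""))
--         entry["ktys"].add(row.get("KnowledgeTypeID", ""))
--         entry["mapping_roles"].add(row.get("MappingRole", ""))
--         entry["contribution_scopes"].add(row.get("ContributionScope", ""))
--         entry["lifecycle_states"].add(row.get("LifecycleState", ""))
--         entry["current_state_basis"].add(row.get("CurrentStateBasis", ""))
--     return index
-- ===== SOURCE B (Python) =====
-- def section_map_index(rows):
--     # Pass 1: group rows by artifact (first-seen order, skipping empty ArtifactPath).
--     grouping = {}
--     for row in rows:
--         artifact = row.get("ArtifactPath", "")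
--         if not artifact:
--             continue
--         grouping.setdefault(artifact, []).append(row)
--     # Pass 2: build each artifact's entry from its collected rows at once.
--     return {
--         artifact: {
--             "sections": {row.get("SectionID", "") for row in grouped},
--             "ktys": {row.get("KnowledgeTypeID", "") for row in grouped},
--             "mapping_roles": {row.get("MappingRole", "") for row in grouped},
--             "contribution_scopes": {row.get("ContributionScope", "") for row in grouped},
--             "lifecycle_states": {row.get("LifecycleState", "") for row in grouped},
--             "current_state_basis": {row.get("CurrentStateBasis", "") for row in grouped},
--         }
--         for artifact, grouped in grouping.items()
--     }
-- ===== Notes on version B (the rewrite author's own statement) =====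
-- stated objective: alternative
-- what changed: Replaces A's single interleaved pass that mutates six sets per row inside a dict-of-dicts with a two-phase decomposition: first group the rows per artifact, then build each artifact's six sets from its collected rows via set comprehensions.
import Mathlib
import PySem

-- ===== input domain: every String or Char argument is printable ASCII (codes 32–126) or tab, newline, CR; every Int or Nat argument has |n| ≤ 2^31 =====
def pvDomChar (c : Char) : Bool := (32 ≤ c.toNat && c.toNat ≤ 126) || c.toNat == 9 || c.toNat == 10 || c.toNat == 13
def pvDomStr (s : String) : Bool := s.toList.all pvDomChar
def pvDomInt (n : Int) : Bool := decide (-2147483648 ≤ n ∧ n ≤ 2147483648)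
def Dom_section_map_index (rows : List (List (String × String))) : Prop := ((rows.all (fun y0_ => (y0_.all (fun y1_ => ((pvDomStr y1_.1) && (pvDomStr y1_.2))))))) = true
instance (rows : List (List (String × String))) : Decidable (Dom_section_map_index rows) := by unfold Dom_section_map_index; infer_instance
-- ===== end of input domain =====

-- B replaces A's single interleaved pass (mutating six sets per row) with a grouping pass plus a
-- per-artifact aggregation pass; alternative decomposition of the same cost, return values identical.

-- ===== PORT A =====
-- row.get(k, "") where the row dict arrives as an association list (dict(...) semantics: later duplicates win)
def smiGet (row : List (String × String)) (k : String) : String :=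
  PySem.Dict.getD (PySem.Dict.ofList row) k ""

-- the setdefault default: six empty sets
def smiDefault : PySem.Dict String (PySem.Set String) :=
  PySem.Dict.ofList [("sections", PySem.Set.empty), ("ktys", PySem.Set.empty),
    ("mapping_roles", PySem.Set.empty), ("contribution_scopes", PySem.Set.empty),
    ("lifecycle_states", PySem.Set.empty), ("current_state_basis", PySem.Set.empty)]

-- the six entry["…"].add(row.get(…)) mutations of A's loop body
def smiAddRow (entry : PySem.Dict String (PySem.Set String)) (row : List (String × String)) :
    PySem.Dict String (PySem.Set String) :=
  let e := entry.modify "sections" PySem.Set.empty (fun s => PySem.Set.add s (smiGet row "SectionID"))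
  let e := e.modify "ktys" PySem.Set.empty (fun s => PySem.Set.add s (smiGet row "KnowledgeTypeID"))
  let e := e.modify "mapping_roles" PySem.Set.empty (fun s => PySem.Set.add s (smiGet row "MappingRole"))
  let e := e.modify "contribution_scopes" PySem.Set.empty (fun s => PySem.Set.add s (smiGet row "ContributionScope"))
  let e := e.modify "lifecycle_states" PySem.Set.empty (fun s => PySem.Set.add s (smiGet row "LifecycleState"))
  let e := e.modify "current_state_basis" PySem.Set.empty (fun s => PySem.Set.add s (smiGet row "CurrentStateBasis"))
  e

-- A's loop body: setdefault (getD + re-insert: overwrite keeps position, new key appends) then the six adds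
def smiStepA (index : PySem.Dict String (PySem.Dict String (PySem.Set String)))
    (row : List (String × String)) : PySem.Dict String (PySem.Dict String (PySem.Set String)) :=
  let artifact := smiGet row "ArtifactPath"
  if artifact = "" then index
  else
    let entry := index.getD artifact smiDefault
    index.insert artifact (smiAddRow entry row)

def section_map_index (rows : List (List (String × String))) :
    List (String × List (String × List String)) :=
  ((rows.foldl smiStepA PySem.Dict.empty).items).map (fun p => (p.1, p.2.items))

-- ===== PORT B =====
-- pass 1 loop body: grouping.setdefault(artifact, []).append(row)  (in-place append to the stored list)
def smiStepB (g : PySem.Dict String (List (List (String × String))))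
    (row : List (String × String)) : PySem.Dict String (List (List (String × String))) :=
  let artifact := smiGet row "ArtifactPath"
  if artifact = "" then g
  else g.insert artifact (g.getD artifact [] ++ [row])

-- pass 2: the literal entry dict of six set comprehensions over the artifact's collected rows
def smiEntry (grouped : List (List (String × String))) : List (String × List String) :=
  [("sections", PySem.Set.ofList (grouped.map (fun r => smiGet r "SectionID"))),
   ("ktys", PySem.Set.ofList (grouped.map (fun r => smiGet r "KnowledgeTypeID"))),
   ("mapping_roles", PySem.Set.ofList (grouped.map (fun r => smiGet r "MappingRole"))),
   ("contribution_scopes", PySem.Set.ofList (grouped.map (fun r => smiGet r "ContributionScope"))),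
   ("lifecycle_states", PySem.Set.ofList (grouped.map (fun r => smiGet r "LifecycleState"))),
   ("current_state_basis", PySem.Set.ofList (grouped.map (fun r => smiGet r "CurrentStateBasis")))]

def section_map_index_alt (rows : List (List (String × String))) :
    List (String × List (String × List String)) :=
  (((rows.foldl smiStepB PySem.Dict.empty).items.foldl (fun idx p => idx.insert p.1 (smiEntry p.2))
      (PySem.Dict.empty : PySem.Dict String (List (String × List String)))).items)

-- ===== PRECONDITION & SPEC =====
def Spec_section_map_index (rows : List (List (String × String))) (out : List (String × List (String × List String))) : Prop := out = section_map_index_alt rows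
instance (rows : List (List (String × String))) (out : List (String × List (String × List String))) : Decidable (Spec_section_map_index rows out) := by unfold Spec_section_map_index; infer_instance

-- ===== CLAIM (what is proved, stated in full; the proofs are below) =====
def Claim_equal_section_map_index : Prop := ∀ (rows : List (List (String × String))), Dom_section_map_index rows → Spec_section_map_index rows (section_map_index rows)

-- ===== LEMMAS AND PROOFS =====

-- the value-level view of a grouping dict through A's eyes
def smiAgg (g : PySem.Dict String (List (List (String × String)))) :
    PySem.Dict String (PySem.Dict String (PySem.Set String)) :=
  PySem.Dict.mk (g.items.map (fun p => (p.1, PySem.Dict.mk (smiEntry p.2))))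

theorem smiDefault_eq : smiDefault = PySem.Dict.mk (smiEntry []) := by decide

theorem smiAddRow_entry (l : List (List (String × String))) (row : List (String × String)) :
    smiAddRow (PySem.Dict.mk (smiEntry l)) row = PySem.Dict.mk (smiEntry (l ++ [row])) := by
  simp [smiAddRow, smiEntry, PySem.Dict.modify, PySem.Dict.getD, PySem.Dict.get?_mk_cons,
    PySem.Dict.contains_mk, PySem.Dict.insert, PySem.Set.ofList_eq_foldl, List.map_append]

theorem smiAgg_contains (g : PySem.Dict String (List (List (String × String)))) (k : String) :
    (smiAgg g).contains k = g.contains k := by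
  simp [PySem.Dict.contains_eq_decide_mem_keys, smiAgg, PySem.Dict.keys]

theorem getD_mk_map (items : List (String × List (List (String × String)))) (k : String) :
    (PySem.Dict.mk (items.map (fun p => (p.1, PySem.Dict.mk (smiEntry p.2))))).getD k smiDefault
      = PySem.Dict.mk (smiEntry ((PySem.Dict.mk items).getD k [])) := by
  induction items with
  | nil => simpa using smiDefault_eq
  | cons p t ih =>
    obtain ⟨pk, pv⟩ := p
    by_cases h : pk == k
    · simp [PySem.Dict.getD_eq_get?_getD, PySem.Dict.get?_mk_cons, h]
    · simpa [PySem.Dict.getD_eq_get?_getD, PySem.Dict.get?_mk_cons, h]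
        using ih

theorem smiAgg_getD (g : PySem.Dict String (List (List (String × String)))) (k : String) :
    (smiAgg g).getD k smiDefault = PySem.Dict.mk (smiEntry (g.getD k [])) := by
  have := getD_mk_map g.items k
  simpa [smiAgg] using this

theorem smiAgg_items (g : PySem.Dict String (List (List (String × String)))) :
    (smiAgg g).items = g.items.map (fun p => (p.1, PySem.Dict.mk (smiEntry p.2))) := rfl

theorem smiAgg_insert (g : PySem.Dict String (List (List (String × String))))
    (a : String) (v : List (List (String × String))) :
    (smiAgg g).insert a (PySem.Dict.mk (smiEntry v)) = smiAgg (g.insert a v) := by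
  apply PySem.Dict.ext
  rw [PySem.Dict.items_insert, smiAgg_items, smiAgg_items, PySem.Dict.items_insert,
    smiAgg_contains]
  by_cases hc : g.contains a
  · simp only [hc, if_true, List.map_map]
    apply List.map_congr_left
    intro p _
    by_cases h : p.1 = a <;> simp [h]
  · simp [hc]

theorem step_comm (g : PySem.Dict String (List (List (String × String))))
    (row : List (String × String)) :
    smiStepA (smiAgg g) row = smiAgg (smiStepB g row) := by
  unfold smiStepA smiStepB
  by_cases h : smiGet row "ArtifactPath" = ""
  · simp [h]
  · simp only [h, if_false]
    rw [smiAgg_getD, smiAddRow_entry, smiAgg_insert]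

theorem foldl_comm (rows : List (List (String × String)))
    (g : PySem.Dict String (List (List (String × String)))) :
    rows.foldl smiStepA (smiAgg g) = smiAgg (rows.foldl smiStepB g) := by
  induction rows generalizing g with
  | nil => rfl
  | cons r rs ih =>
    simp only [List.foldl_cons, step_comm g r]
    exact ih _

theorem stepB_nodup (g : PySem.Dict String (List (List (String × String))))
    (hg : g.keys.Nodup) (row : List (String × String)) :
    (smiStepB g row).keys.Nodup := by
  unfold smiStepB
  by_cases h : smiGet row "ArtifactPath" = ""
  · simpa [h] using hg
  · simpa [h] using PySem.Dict.nodup_keys_insert _ _ _ hg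

theorem foldl_stepB_nodup (rows : List (List (String × String)))
    (g : PySem.Dict String (List (List (String × String)))) (hg : g.keys.Nodup) :
    (rows.foldl smiStepB g).keys.Nodup := by
  induction rows generalizing g with
  | nil => exact hg
  | cons r rs ih => exact ih _ (stepB_nodup g hg r)

-- ===== VERDICT (by name: the statement is the Claim_ definition above) =====
theorem section_map_index_spec : Claim_equal_section_map_index := by
  intro rows _
  unfold Spec_section_map_index section_map_index section_map_index_alt
  have h0 : (PySem.Dict.empty : PySem.Dict String (PySem.Dict String (PySem.Set String))) = smiAgg PySem.Dict.empty := rfl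
  rw [h0, foldl_comm rows PySem.Dict.empty]
  have hnd : (rows.foldl smiStepB PySem.Dict.empty).keys.Nodup :=
    foldl_stepB_nodup rows PySem.Dict.empty (PySem.Dict.nodup_keys_empty)
  rw [PySem.Dict.items_foldl_insert_fresh
    ((rows.foldl smiStepB PySem.Dict.empty).items) (fun p => p.1) (fun p => smiEntry p.2)
    PySem.Dict.empty (fun a _ => rfl) (by simpa [PySem.Dict.keys] using hnd)]
  rw [show (PySem.Dict.empty : PySem.Dict String (List (String × List String))).items = [] from rfl,
    List.nil_append, smiAgg_items, List.map_map]
  exact List.map_congr_left (fun p _ => rfl)
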